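-- pv_equiv track=rewrite | github.com/KarimbaYo/quodlibet-plugins | editing/RenamingPathPrune.py | _get_best_value
-- ===== SOURCE A (Python) =====
-- def _get_best_value(part, priority_words, avoid_words):
--     values = [v.strip() for v in part.split(',')]
--     if len(values) <= 1:
--         return part
--
--     for p_word in priority_words:
--         for value in values:
--             if p_word == value.lower():
--                 return value
--
--     found_value = None
--     for value in values:
--         if value.lower() not in avoid_words:
--             found_value = value
--             break
--
--     return found_value if found_value is not None else values[0]
-- ===== SOURCE B (Python) =====
-- def _get_best_value(part, priority_words, avoid_words):
--     values = [v.strip() for v in part.split(',')]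
--     if len(values) <= 1:
--         return part
--
--     n = len(priority_words)
--
--     def rank(v):
--         lv = v.lower()
--         return priority_words.index(lv) if lv in priority_words else n
--
--     best = min(values, key=rank)
--     if rank(best) < n:
--         return best
--
--     return next((v for v in values if v.lower() not in avoid_words), values[0])
-- ===== Notes on version B (the rewrite author's own statement) =====
-- stated objective: alternative
-- what changed: Replaces A's nested priority-word/value loops with a single min-by-rank pass: each value is scored by the index of its lowercased form in priority_words (or len(priority_words) if absent) and Python's first-minimum min() picks the winner, reproducing A's earliest-word/first-value tie-breaking; the avoid-word scan becomes a next() over a generator.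
import Mathlib
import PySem

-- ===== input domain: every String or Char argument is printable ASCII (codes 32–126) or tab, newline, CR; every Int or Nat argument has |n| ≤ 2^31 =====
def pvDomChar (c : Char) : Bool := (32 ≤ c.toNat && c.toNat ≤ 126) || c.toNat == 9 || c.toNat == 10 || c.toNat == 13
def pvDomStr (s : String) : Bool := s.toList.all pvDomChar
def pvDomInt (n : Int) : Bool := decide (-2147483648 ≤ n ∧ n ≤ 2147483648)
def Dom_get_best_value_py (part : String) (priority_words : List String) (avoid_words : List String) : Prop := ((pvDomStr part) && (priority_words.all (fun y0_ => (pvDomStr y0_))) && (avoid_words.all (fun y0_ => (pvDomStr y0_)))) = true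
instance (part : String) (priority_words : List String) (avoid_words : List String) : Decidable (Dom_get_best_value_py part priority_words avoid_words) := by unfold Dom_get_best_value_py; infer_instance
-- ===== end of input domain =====

-- B replaces A's nested priority-word loop by a single min-by-rank pass (rank = index in
-- priority_words, or its length if absent); objective: alternative decomposition, same cost.

-- ===== PORT A =====
-- the nested 'for p_word: for value:' loop; inner loop = first value with p_word == value.lower()
def pvAPrio (priority_words : List String) (values : List String) : Option String :=
  match priority_words with
  | [] => none
  | p :: ps =>
    match values.find? (fun value => p == PySem.Str.lower value) with
    | some value => some value
    | none => pvAPrio ps values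

def get_best_value_py (part : String) (priority_words : List String) (avoid_words : List String) : String :=
  let values := ((PySem.Str.split? part ",").getD []).map PySem.Str.strip   -- sep "," ≠ "", so split? is some
  if values.length ≤ 1 then part
  else
    match pvAPrio priority_words values with
    | some value => value
    | none =>
      -- 'found_value = None; for value: if value.lower() not in avoid_words: break'
      match values.find? (fun value => !(avoid_words.contains (PySem.Str.lower value))) with
      | some found_value => found_value
      | none => values.getD 0 ""   -- values[0]; values ≠ [] in this branch

-- ===== PORT B =====
-- rank(v) = priority_words.index(v.lower()) if v.lower() in priority_words else n
def pvRank (priority_words : List String) (v : String) : Nat :=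
  let lv := PySem.Str.lower v
  if priority_words.contains lv then (PySem.List.index? priority_words lv).getD priority_words.length
  else priority_words.length

def get_best_value_py_alt (part : String) (priority_words : List String) (avoid_words : List String) : String :=
  let values := ((PySem.Str.split? part ",").getD []).map PySem.Str.strip
  if values.length ≤ 1 then part
  else
    match PySem.List.min? values (pvRank priority_words) with
    | some best =>
      if pvRank priority_words best < priority_words.length then best
      else
        -- next((v for v in values if v.lower() not in avoid_words), values[0])
        (values.find? (fun v => !(avoid_words.contains (PySem.Str.lower v)))).getD (values.getD 0 "")
    | none => part   -- unreachable: values ≠ [] here (min over an empty list)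

-- ===== PRECONDITION & SPEC =====
def Spec_get_best_value_py (part : String) (priority_words : List String) (avoid_words : List String) (out : String) : Prop := out = get_best_value_py_alt part priority_words avoid_words
instance (part : String) (priority_words : List String) (avoid_words : List String) (out : String) : Decidable (Spec_get_best_value_py part priority_words avoid_words out) := by unfold Spec_get_best_value_py; infer_instance

-- ===== CLAIM (what is proved, stated in full; the proofs are below) =====
def Claim_equal_get_best_value_py : Prop := ∀ (part : String) (priority_words : List String) (avoid_words : List String), Dom_get_best_value_py part priority_words avoid_words → Spec_get_best_value_py part priority_words avoid_words (get_best_value_py part priority_words avoid_words)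

-- ===== LEMMAS AND PROOFS =====

-- min?'s fold step, named so that we can induct over the fold
def pvStep {α : Type} (key : α → Nat) (acc : Option α) (x : α) : Option α :=
  match acc with
  | none => some x
  | some m => if key x < key m then some x else some m

theorem pvStep_none {α : Type} (key : α → Nat) (x : α) : pvStep key none x = some x := rfl

theorem pvStep_some {α : Type} (key : α → Nat) (m x : α) :
    pvStep key (some m) x = if key x < key m then some x else some m := rfl

theorem pvMin?_eq {α : Type} (xs : List α) (key : α → Nat) :
    PySem.List.min? xs key = xs.foldl (pvStep key) none := rfl

theorem pvStep_stay {α : Type} (key : α → Nat) (l : List α) (m : α) (hm : key m = 0) :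
    l.foldl (pvStep key) (some m) = some m := by
  induction l with
  | nil => rfl
  | cons x t ih =>
    simp only [List.foldl_cons, pvStep_some, hm]
    simp [ih]

theorem pvFind_go {α : Type} (key : α → Nat) (Q : α → Bool)
    (HQ : ∀ x, Q x = true ↔ key x = 0) :
    ∀ (l : List α) (acc : Option α) (v : α),
      (∀ m, acc = some m → key m ≠ 0) → l.find? Q = some v →
      l.foldl (pvStep key) acc = some v := by
  intro l
  induction l with
  | nil => intro acc v _ h; simp at h
  | cons x t ih =>
    intro acc v hacc hf
    by_cases hq : Q x = true
    · have hx0 : key x = 0 := (HQ x).mp hq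
      have hv : v = x := by
        simp [hq] at hf
        exact hf.symm
      subst hv
      have hstep : pvStep key acc v = some v := by
        cases acc with
        | none => rfl
        | some m =>
          have hm := hacc m rfl
          rw [pvStep_some]
          simp [hx0, Nat.pos_of_ne_zero hm]
      simp only [List.foldl_cons, hstep]
      exact pvStep_stay key t v hx0
    · have hq' : Q x = false := by simpa using hq
      have hf' : t.find? Q = some v := by simpa [List.find?_cons, hq'] using hf
      have hx0 : key x ≠ 0 := fun h => hq ((HQ x).mpr h)
      have hacc' : ∀ m, pvStep key acc x = some m → key m ≠ 0 := by
        intro m hm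
        cases acc with
        | none => rw [pvStep_none] at hm; cases hm; exact hx0
        | some m0 =>
          rw [pvStep_some] at hm
          split at hm
          · cases hm; exact hx0
          · cases hm; exact hacc _ rfl
      simpa using ih (pvStep key acc x) v hacc' hf'

theorem pvShift_go {α : Type} (key1 key2 : α → Nat) :
    ∀ (l : List α) (acc : Option α),
      (∀ x ∈ l, key1 x = key2 x + 1) →
      (∀ m, acc = some m → key1 m = key2 m + 1) →
      l.foldl (pvStep key1) acc = l.foldl (pvStep key2) acc := by
  intro l
  induction l with
  | nil => intro _ _ _; rfl
  | cons x t ih =>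
    intro acc hl hacc
    have hx := hl x (by simp)
    have hstep : pvStep key1 acc x = pvStep key2 acc x := by
      cases acc with
      | none => rfl
      | some m =>
        have hm := hacc m rfl
        rw [pvStep_some, pvStep_some, hx, hm]
        by_cases h : key2 x < key2 m <;> simp [h]
    have hacc' : ∀ m, pvStep key2 acc x = some m → key1 m = key2 m + 1 := by
      intro m hm
      cases acc with
      | none => rw [pvStep_none] at hm; cases hm; exact hx
      | some m0 =>
        rw [pvStep_some] at hm
        split at hm
        · cases hm; exact hx
        · cases hm; exact hacc _ rfl
    simp only [List.foldl_cons, hstep]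
    exact ih (pvStep key2 acc x) (fun y hy => hl y (by simp [hy])) hacc'

theorem pvRank_nil (v : String) : pvRank [] v = 0 := by
  simp [pvRank]

theorem pvRank_cons (p : String) (ps : List String) (v : String) :
    pvRank (p :: ps) v =
      if p == PySem.Str.lower v then 0 else pvRank ps v + 1 := by
  simp only [pvRank]
  by_cases hp : p = PySem.Str.lower v
  · subst hp
    rw [PySem.List.index?_cons_self]
    simp
  · have hbe : (p == PySem.Str.lower v) = false := by simp [hp]
    have hbe2 : ((PySem.Str.lower v) == p) = false := by simp [Ne.symm hp]
    rw [PySem.List.index?_cons_of_ne ps hp, List.contains_cons, hbe2]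
    by_cases hmem : PySem.Str.lower v ∈ ps
    · obtain ⟨k, hk⟩ := Option.isSome_iff_exists.mp
        ((PySem.List.index?_isSome_iff ps (PySem.Str.lower v)).mpr hmem)
      simp only [PySem.List.index?_eq_idxOf?] at hk
      simp [hbe, hmem, hk]
    · have hnone : PySem.List.index? ps (PySem.Str.lower v) = none :=
        (PySem.List.index?_eq_none_iff ps (PySem.Str.lower v)).mpr hmem
      simp only [PySem.List.index?_eq_idxOf?] at hnone
      simp [hbe, hmem]

-- the nested priority loop computes the min-by-rank value exactly when that rank beats len(priority_words)
theorem pvAPrio_eq (priority_words values : List String) :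
    pvAPrio priority_words values =
      match PySem.List.min? values (pvRank priority_words) with
      | some b => if pvRank priority_words b < priority_words.length then some b else none
      | none => none := by
  induction priority_words with
  | nil =>
    cases h : PySem.List.min? values (pvRank []) with
    | none => rfl
    | some b => simp [pvAPrio, pvRank_nil]
  | cons p ps ih =>
    cases hf : values.find? (fun value => p == PySem.Str.lower value) with
    | some v =>
      have hmin : PySem.List.min? values (pvRank (p :: ps)) = some v := by
        rw [pvMin?_eq]
        exact pvFind_go (pvRank (p :: ps)) _
          (by intro x; rw [pvRank_cons]; by_cases h : (p == PySem.Str.lower x) = true <;> simp [h])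
          values none v (by intro m h; cases h) hf
      have hv0 : pvRank (p :: ps) v = 0 := by
        have hp := List.find?_some hf
        rw [pvRank_cons, hp]
        rfl
      simp [pvAPrio, hf, hmin, hv0]
    | none =>
      have hnotin : ∀ x ∈ values, (p == PySem.Str.lower x) = false := by
        intro x hx
        simpa using List.find?_eq_none.mp hf x hx
      have hshift : ∀ x ∈ values, pvRank (p :: ps) x = pvRank ps x + 1 := by
        intro x hx
        rw [pvRank_cons, hnotin x hx]
        simp
      have hmin : PySem.List.min? values (pvRank (p :: ps)) = PySem.List.min? values (pvRank ps) := by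
        rw [pvMin?_eq, pvMin?_eq]
        exact pvShift_go _ _ values none hshift (by intro m h; cases h)
      simp only [pvAPrio, hf]
      rw [ih, hmin]
      cases hm : PySem.List.min? values (pvRank ps) with
      | none => rfl
      | some b =>
        have hb : b ∈ values := PySem.List.min?_mem hm
        have hbr : pvRank (p :: ps) b = pvRank ps b + 1 := hshift b hb
        simp only [hbr, List.length_cons]
        by_cases h : pvRank ps b < ps.length <;> simp [h]

-- the two bodies (with the shared 'values' abstracted) agree
theorem pv_body (part : String) (priority_words avoid_words : List String) (values : List String) :
    (if values.length ≤ 1 then part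
     else
       match pvAPrio priority_words values with
       | some value => value
       | none =>
         match values.find? (fun value => !(avoid_words.contains (PySem.Str.lower value))) with
         | some found_value => found_value
         | none => values.getD 0 "") =
    (if values.length ≤ 1 then part
     else
       match PySem.List.min? values (pvRank priority_words) with
       | some best =>
         if pvRank priority_words best < priority_words.length then best
         else (values.find? (fun v => !(avoid_words.contains (PySem.Str.lower v)))).getD (values.getD 0 "")
       | none => part) := by
  by_cases hlen : values.length ≤ 1
  · simp [hlen]
  · have hne : values ≠ [] := by
      intro h; rw [h] at hlen; simp at hlen
    simp only [hlen, if_false]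
    rw [pvAPrio_eq]
    cases hm : PySem.List.min? values (pvRank priority_words) with
    | none => exact absurd ((PySem.List.min?_eq_none_iff values (pvRank priority_words)).mp hm) hne
    | some b =>
      by_cases hr : pvRank priority_words b < priority_words.length
      · simp [hr]
      · simp only [hr, if_false]
        cases hfind : values.find? (fun v => !(avoid_words.contains (PySem.Str.lower v))) with
        | some fv => simp
        | none => simp

-- ===== VERDICT (by name: the statement is the Claim_ definition above) =====
theorem get_best_value_py_spec : Claim_equal_get_best_value_py := by
  intro part priority_words avoid_words _
  unfold Spec_get_best_value_py
  exact pv_body part priority_words avoid_words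
    (((PySem.Str.split? part ",").getD []).map PySem.Str.strip)
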